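-- pv_equiv track=rewrite | github.com/wojtek9/RookceptionCNN | src/ChessBoard.py | fen_to_board
-- ===== SOURCE A (Python) =====
-- import string
--
-- def fen_to_board(fen):
--     """Converts a FEN string into a dictionary of piece positions."""
--     rows = fen.split()[0].split("/")  # Get only the board part of FEN
--     board = {}
--
--     ranks = list(range(8, 0, -1))  # Chess ranks (8 to 1)
--     files = list(string.ascii_uppercase[:8])  # Chess files (A to H)
--
--     for row_idx, row in enumerate(rows):
--         file_idx = 0
--         for char in row:
--             if char.isdigit():
--                 file_idx += int(char)  # Empty squares
--             else:
--                 square = f"{files[file_idx]}{ranks[row_idx]}"  # Example: "E4"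
--                 board[square] = char
--                 file_idx += 1
--
--     return board
-- ===== SOURCE B (Python) =====
-- def fen_to_board(fen):
--     """Converts a FEN string into a dictionary of piece positions."""
--     rows = fen.split()[0].split("/")
--     files = "ABCDEFGH"
--     ranks = "87654321"
--     board = {}
--     for row_idx, row in enumerate(rows):
--         # expand the rank: each digit char becomes that many None placeholders
--         expanded = [p for ch in row
--                       for p in ([None] * int(ch) if ch.isdigit() else [ch])]
--         for i, ch in enumerate(expanded):
--             if ch is not None:
--                 board[files[i] + ranks[row_idx]] = ch
--     return board
-- ===== Notes on version B (the rewrite author's own statement) =====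
-- stated objective: alternative
-- what changed: Instead of threading a running file_idx through each rank's characters, B expands every rank into a fixed placeholder row (each digit becomes that many None entries) and places pieces at their enumerate index.
import Mathlib
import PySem

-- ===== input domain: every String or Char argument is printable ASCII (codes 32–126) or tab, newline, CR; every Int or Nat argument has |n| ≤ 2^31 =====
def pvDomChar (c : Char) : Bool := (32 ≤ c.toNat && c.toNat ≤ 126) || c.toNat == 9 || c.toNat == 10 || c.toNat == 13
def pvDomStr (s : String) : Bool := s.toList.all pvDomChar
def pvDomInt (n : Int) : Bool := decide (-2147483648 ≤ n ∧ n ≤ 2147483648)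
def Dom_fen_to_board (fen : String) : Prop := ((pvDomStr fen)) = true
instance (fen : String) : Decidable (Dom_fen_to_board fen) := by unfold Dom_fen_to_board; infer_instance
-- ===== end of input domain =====

-- B re-decomposes A's running-file_idx scan: each rank is first expanded to a placeholder row
-- (digits become that many `none`s) and pieces are then placed by their enumerate index
-- (objective: alternative decomposition, not faster). Return-value equivalence only; neither mutates.

-- ===== PORT A =====
-- one step of A's inner loop over the characters of a rank, state = (board, file_idx)
def pvStepA (files : List Char) (ranks : List Int) (ri : Int)
    (st : PySem.Dict String String × Int) (c : Char) : PySem.Dict String String × Int :=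
  if PySem.Chars.isdigit c then            -- char.isdigit() on the 1-char string = digit test on the char
    (st.1, st.2 + (PySem.Int.ofChars? [c]).getD 0)   -- int(char); getD never fires: isdigit c → parse succeeds
  else
    (st.1.insert
        (String.mk ((PySem.List.pyGet? files st.2).getD 'A'       -- files[file_idx]; getD unreachable under Pre_
            :: PySem.Int.toChars ((PySem.List.pyGet? ranks ri).getD 0)))  -- str(ranks[row_idx]); getD unreachable under Pre_
        (String.mk [c]),
     st.2 + 1)

def fen_to_board (fen : String) : List (String × String) :=
  let rows := PySem.Chars.splitOn
      ((PySem.List.pyGet? (PySem.Chars.split₀ fen.toList) 0).getD []) ['/']  -- fen.split()[0].split("/"); getD unreachable under Pre_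
  let ranks : List Int := PySem.List.pyRange 8 0 (-1)                        -- list(range(8, 0, -1))
  let files : List Char := PySem.Chars.slice "ABCDEFGHIJKLMNOPQRSTUVWXYZ".toList none (some 8)  -- string.ascii_uppercase[:8]
  ((PySem.List.enumerate rows 0).foldl
      (fun (board : PySem.Dict String String) p => (p.2.foldl (pvStepA files ranks p.1) (board, 0)).1)
      PySem.Dict.empty).items

-- ===== PORT B =====
-- the comprehension: digits become int(ch) `none` placeholders, pieces stay
def pvExpand (row : List Char) : List (Option Char) :=
  row.flatMap (fun c =>
    if PySem.Chars.isdigit c then List.replicate ((PySem.Int.ofChars? [c]).getD 0).toNat none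
    else [some c])

-- one step of B's placement loop over enumerate(expanded)
def pvStepB (files ranks : List Char) (ri : Int)
    (board : PySem.Dict String String) (q : Int × Option Char) : PySem.Dict String String :=
  match q.2 with
  | none => board
  | some c => board.insert
      (String.mk [(PySem.List.pyGet? files q.1).getD 'A',            -- files[i]; getD unreachable under Pre_
                  (PySem.List.pyGet? ranks ri).getD 'A'])            -- ranks[row_idx]; getD unreachable under Pre_
      (String.mk [c])

def fen_to_board_alt (fen : String) : List (String × String) :=
  let rows := PySem.Chars.splitOn
      ((PySem.List.pyGet? (PySem.Chars.split₀ fen.toList) 0).getD []) ['/']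
  let files : List Char := "ABCDEFGH".toList
  let ranks : List Char := "87654321".toList
  ((PySem.List.enumerate rows 0).foldl
      (fun (board : PySem.Dict String String) p =>
        (PySem.List.enumerate (pvExpand p.2) 0).foldl (pvStepB files ranks p.1) board)
      PySem.Dict.empty).items

-- ===== PRECONDITION & SPEC =====
-- weight a char contributes to A's file_idx: a digit adds its value, a piece adds 1
def pvW (c : Char) : Nat := if PySem.Chars.isdigit c then c.toNat - 48 else 1

-- Pre_ = exactly the inputs on which the Python A returns (no IndexError): the FEN has a first
-- whitespace-separated token, and every piece character sits in a row index < 8 at a file index < 8.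
def Pre_fen_to_board (fen : String) : Prop :=
  PySem.Chars.split₀ fen.toList ≠ [] ∧
  ∀ p ∈ PySem.List.enumerate
      (PySem.Chars.splitOn ((PySem.List.pyGet? (PySem.Chars.split₀ fen.toList) 0).getD []) ['/']) 0,
    ∀ j < p.2.length, PySem.Chars.isdigit (p.2.getD j ' ') = false →
      p.1 < 8 ∧ ((p.2.take j).map pvW).sum < 8
instance (fen : String) : Decidable (Pre_fen_to_board fen) := by unfold Pre_fen_to_board; infer_instance

def pvWitness_fen_to_board : String := "rk1R/3Q w KQ"

def Spec_fen_to_board (fen : String) (out : List (String × String)) : Prop := out = fen_to_board_alt fen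
instance (fen : String) (out : List (String × String)) : Decidable (Spec_fen_to_board fen out) := by unfold Spec_fen_to_board; infer_instance

-- ===== CLAIM (what is proved, stated in full; the proofs are below) =====
def Claim_equal_fen_to_board : Prop := ∀ (fen : String), Dom_fen_to_board fen → Pre_fen_to_board fen → Spec_fen_to_board fen (fen_to_board fen)

-- ===== LEMMAS AND PROOFS =====

lemma pv_digit_ge {c : Char} (h : PySem.Chars.isdigit c = true) : 48 ≤ c.toNat ∧ c.toNat ≤ 57 := by
  simpa [PySem.Chars.isdigit, Char.le_def, UInt32.le_iff_toNat_le] using h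

lemma pv_digit_cases {c : Char} (h : PySem.Chars.isdigit c = true) :
    c = '0' ∨ c = '1' ∨ c = '2' ∨ c = '3' ∨ c = '4' ∨ c = '5' ∨ c = '6' ∨ c = '7' ∨ c = '8' ∨ c = '9' := by
  obtain ⟨h48, h57⟩ := pv_digit_ge h
  have hc : ∀ d : Char, c.toNat = d.toNat → c = d := fun d hh => Char.ext (UInt32.toNat_inj.mp hh)
  interval_cases hn : c.toNat
  · exact Or.inl (hc '0' (by decide))
  · exact Or.inr (Or.inl (hc '1' (by decide)))
  · exact Or.inr (Or.inr (Or.inl (hc '2' (by decide))))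
  · exact Or.inr (Or.inr (Or.inr (Or.inl (hc '3' (by decide)))))
  · exact Or.inr (Or.inr (Or.inr (Or.inr (Or.inl (hc '4' (by decide))))))
  · exact Or.inr (Or.inr (Or.inr (Or.inr (Or.inr (Or.inl (hc '5' (by decide)))))))
  · exact Or.inr (Or.inr (Or.inr (Or.inr (Or.inr (Or.inr (Or.inl (hc '6' (by decide))))))))
  · exact Or.inr (Or.inr (Or.inr (Or.inr (Or.inr (Or.inr (Or.inr (Or.inl (hc '7' (by decide)))))))))
  · exact Or.inr (Or.inr (Or.inr (Or.inr (Or.inr (Or.inr (Or.inr (Or.inr (Or.inl (hc '8' (by decide))))))))))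
  · exact Or.inr (Or.inr (Or.inr (Or.inr (Or.inr (Or.inr (Or.inr (Or.inr (Or.inr (hc '9' (by decide))))))))))

lemma pv_digit_val {c : Char} (h : PySem.Chars.isdigit c = true) :
    PySem.Int.ofChars? [c] = some ((c.toNat : Int) - 48) := by
  rcases pv_digit_cases h with rfl|rfl|rfl|rfl|rfl|rfl|rfl|rfl|rfl|rfl <;> decide

-- folding B's placement step over a block of placeholders changes nothing
lemma pv_skip (files ranks : List Char) (ri : Int) (n : Nat) (s : Int) (board : PySem.Dict String String) :
    (PySem.List.enumerate (List.replicate n (none : Option Char)) s).foldl (pvStepB files ranks ri) board = board := by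
  induction n generalizing s with
  | zero => simp [PySem.List.enumerate_nil]
  | succ m ih => simp [List.replicate_succ, PySem.List.enumerate_cons, pvStepB, ih]

-- the two square strings agree on every in-range (file, rank) pair
lemma pv_key (k : Nat) (hk : k < 8) (ri : Int) (h0 : 0 ≤ ri) (h8 : ri < 8) :
    String.mk ((PySem.List.pyGet? "ABCDEFGH".toList (k : Int)).getD 'A'
        :: PySem.Int.toChars ((PySem.List.pyGet? ([8,7,6,5,4,3,2,1] : List Int) ri).getD 0))
      = String.mk [(PySem.List.pyGet? "ABCDEFGH".toList (k : Int)).getD 'A',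
                   (PySem.List.pyGet? "87654321".toList ri).getD 'A'] := by
  lift ri to Nat using h0 with n
  have hn : n < 8 := by exact_mod_cast h8
  interval_cases n <;> interval_cases k <;> decide

-- the heart: A's inner scan from file_idx = k equals B's placement fold over the expansion, enumerated from k
lemma pv_row (ri : Int) (h0 : 0 ≤ ri) (cs : List Char) (k : Nat) (board : PySem.Dict String String)
    (H : ∀ j < cs.length, PySem.Chars.isdigit (cs.getD j ' ') = false →
         ri < 8 ∧ k + ((cs.take j).map pvW).sum < 8) :
    (cs.foldl (pvStepA "ABCDEFGH".toList [8,7,6,5,4,3,2,1] ri) (board, (k : Int))).1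
      = (PySem.List.enumerate (pvExpand cs) (k : Int)).foldl (pvStepB "ABCDEFGH".toList "87654321".toList ri) board := by
  induction cs generalizing k board with
  | nil => simp [pvExpand, PySem.List.enumerate_nil]
  | cons c cs ih =>
    by_cases hd : PySem.Chars.isdigit c = true
    · -- digit: A advances file_idx, B skips a block of placeholders
      obtain ⟨h48, _⟩ := pv_digit_ge hd
      have hexp : pvExpand (c :: cs)
          = List.replicate (c.toNat - 48) (none : Option Char) ++ pvExpand cs := by
        simp only [pvExpand, List.flatMap_cons, hd, if_true, pv_digit_val hd, Option.getD_some]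
        congr 2
        omega
      rw [hexp, PySem.List.enumerate_append, List.foldl_append, pv_skip]
      simp only [List.foldl_cons, pvStepA, hd, if_true, pv_digit_val hd, Option.getD_some,
        List.length_replicate]
      have hk' : (k : Int) + ((c.toNat : Int) - 48) = ((k + (c.toNat - 48) : Nat) : Int) := by omega
      rw [hk']
      apply ih
      intro j hj hjf
      have := H (j + 1) (by simpa using Nat.succ_lt_succ hj) (by simpa using hjf)
      have hw : pvW c = c.toNat - 48 := by simp [pvW, hd]
      simp only [List.take_succ_cons, List.map_cons, List.sum_cons, hw] at this
      exact ⟨this.1, by omega⟩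
    · -- piece: both insert the same square, file index advances by 1
      have hd' : PySem.Chars.isdigit c = false := eq_false_of_ne_true hd
      have h0' := H 0 (by simp) (by simpa using hd')
      have hri : ri < 8 := h0'.1
      have hk : k < 8 := by simpa using h0'.2
      have hexp : pvExpand (c :: cs) = some c :: pvExpand cs := by
        simp [pvExpand, List.flatMap_cons, hd']
      rw [hexp, PySem.List.enumerate_cons, List.foldl_cons, List.foldl_cons]
      simp only [pvStepA, pvStepB, hd', Bool.false_eq_true, if_false]
      rw [pv_key k hk ri h0 hri]
      have hk1 : (k : Int) + 1 = ((k + 1 : Nat) : Int) := by omega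
      rw [hk1]
      apply ih
      intro j hj hjf
      have := H (j + 1) (by simpa using Nat.succ_lt_succ hj) (by simpa using hjf)
      have hw : pvW c = 1 := by simp [pvW, hd']
      simp only [List.take_succ_cons, List.map_cons, List.sum_cons, hw] at this
      exact ⟨this.1, by omega⟩

-- ===== VERDICT (by name: the statement is the Claim_ definition above) =====
lemma pv_files_eq : PySem.Chars.slice "ABCDEFGHIJKLMNOPQRSTUVWXYZ".toList none (some 8) = "ABCDEFGH".toList := by decide

lemma pv_ranks_eq : PySem.List.pyRange 8 0 (-1) = ([8,7,6,5,4,3,2,1] : List Int) := by decide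

theorem fen_to_board_spec : Claim_equal_fen_to_board := by
  intro fen _hdom hpre
  unfold Spec_fen_to_board fen_to_board fen_to_board_alt
  simp only [pv_files_eq, pv_ranks_eq]
  apply congrArg PySem.Dict.items
  apply PySem.List.foldl_congr_mem
  intro board p hp
  obtain ⟨jj, hjj, rfl⟩ := (PySem.List.mem_enumerate_iff _ _ _).mp hp
  have h0 : (0 : Int) ≤ 0 + (jj : Int) := by omega
  have := pv_row (0 + (jj : Int)) h0 _ 0 board (fun j hj hjf => by
    have := hpre.2 _ hp j hj hjf
    exact ⟨this.1, by simpa using this.2⟩)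
  simpa using this
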